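-- pv_equiv track=rewrite | github.com/christineurban/codewars | python/number-1-matrices-making-an-alternating-sum.py | score_matrix
-- ===== SOURCE A (Python) =====
-- def score_matrix(matrix):
--     rows = []
--     for i in range(len(matrix)):
--         # if even row start with adding
--         if i % 2 == 0:
--             add = True
--         # if odd row start with subtracting
--         else:
--             add = False
--
--         row_sum = 0
--
--         for num in matrix[i]:
--             if add:
--                 row_sum += num
--                 add = False
--             else:
--                 row_sum -= num
--                 add = True
--         rows.append(row_sum)
--     return sum(rows)
-- ===== SOURCE B (Python) =====
-- def score_matrix(matrix):
--     def alt(xs):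
--         # alternating sum x0 - x1 + x2 - ..., computed by pairwise differences
--         t = 0
--         k = 0
--         n = len(xs)
--         while k + 1 < n:
--             t += xs[k] - xs[k + 1]
--             k += 2
--         return t + (xs[k] if k < n else 0)
--     return alt([alt(row) for row in matrix])
-- ===== Notes on version B (the rewrite author's own statement) =====
-- stated objective: alternative
-- what changed: The score is computed as the alternating sum of the rows' alternating sums, with one pairwise-difference helper (consuming two elements per step, adding x[k]-x[k+1]) reused at both levels, instead of A's per-element sign-toggling boolean and intermediate row-sum list.
import Mathlib
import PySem

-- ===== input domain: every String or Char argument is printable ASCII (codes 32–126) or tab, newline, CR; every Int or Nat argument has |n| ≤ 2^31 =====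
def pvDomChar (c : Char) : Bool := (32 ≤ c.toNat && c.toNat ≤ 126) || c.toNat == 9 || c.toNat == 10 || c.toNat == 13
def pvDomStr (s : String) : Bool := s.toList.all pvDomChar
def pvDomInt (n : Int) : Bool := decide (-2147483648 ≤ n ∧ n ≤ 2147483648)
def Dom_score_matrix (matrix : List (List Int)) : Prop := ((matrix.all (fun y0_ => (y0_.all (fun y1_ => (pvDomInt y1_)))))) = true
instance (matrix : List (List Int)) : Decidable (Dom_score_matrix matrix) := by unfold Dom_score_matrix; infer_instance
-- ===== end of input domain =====

-- B computes the score as the alternating sum of the rows' alternating sums, with one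
-- pairwise-difference helper reused at both levels, instead of A's per-element
-- sign-toggling boolean and intermediate row-sum list: an alternative decomposition, same cost.

-- ===== PORT A =====
def score_matrix (matrix : List (List Int)) : Int :=
  let rows := (PySem.List.pyRange 0 (PySem.List.len matrix) 1).foldl
    (fun rows i =>
      let add : Bool := PySem.Int.mod i 2 == 0
      let st := (PySem.List.pyGetD matrix i []).foldl
        (fun (st : Int × Bool) num =>
          if st.2 then (st.1 + num, false) else (st.1 - num, true)) (0, add)
      rows ++ [st.1]) []
  rows.sum

-- ===== PORT B =====
-- Source B's while loop 'while k + 1 < n: t += xs[k] - xs[k+1]; k += 2' advances k by 2, i.e.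
-- consumes two elements per iteration; it is ported as structural recursion on the list
-- consuming two elements per step with the same state t.  The trailing
-- 'xs[k] if k < n else 0' is the ≤ 1 leftover element.
def pvAltLoop (t : Int) : List Int → Int
  | x :: y :: r => pvAltLoop (t + (x - y)) r
  | [x] => t + x
  | [] => t

def pvAlt (xs : List Int) : Int := pvAltLoop 0 xs

def score_matrix_alt (matrix : List (List Int)) : Int :=
  pvAlt (matrix.map pvAlt)

-- ===== PRECONDITION & SPEC =====
def Spec_score_matrix (matrix : List (List Int)) (out : Int) : Prop := out = score_matrix_alt matrix
instance (matrix : List (List Int)) (out : Int) : Decidable (Spec_score_matrix matrix out) := by unfold Spec_score_matrix; infer_instance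

-- ===== CLAIM (what is proved, stated in full; the proofs are below) =====
def Claim_equal_score_matrix : Prop := ∀ (matrix : List (List Int)), Dom_score_matrix matrix → Spec_score_matrix matrix (score_matrix matrix)

-- ===== LEMMAS AND PROOFS =====

-- the alternating sum x0 - x1 + x2 - …, the common characterisation of both programs
def pvAltSum : List Int → Int
  | [] => 0
  | x :: r => x - pvAltSum r

theorem pvAltLoop_eq (t : Int) (xs : List Int) : pvAltLoop t xs = t + pvAltSum xs := by
  induction t, xs using pvAltLoop.induct with
  | case1 t x y r ih => simp only [pvAltLoop, pvAltSum] at *; omega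
  | case2 t x => simp [pvAltLoop, pvAltSum]
  | case3 t => simp [pvAltLoop, pvAltSum]

theorem pvAlt_eq (xs : List Int) : pvAlt xs = pvAltSum xs := by
  rw [pvAlt, pvAltLoop_eq, zero_add]

-- A's toggling inner loop computes ±(alternating sum of the row)
theorem pv_row (row : List Int) : ∀ (acc : Int) (b : Bool),
    (row.foldl (fun (st : Int × Bool) num =>
        if st.2 then (st.1 + num, false) else (st.1 - num, true)) (acc, b)).1
      = acc + (if b then pvAltSum row else -pvAltSum row) := by
  induction row with
  | nil => intro acc b; cases b <;> simp [pvAltSum]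
  | cons x t ih =>
      intro acc b
      cases b with
      | true =>
          simp only [List.foldl_cons, pvAltSum, if_true]
          rw [ih (acc + x) false]
          simp; ring
      | false =>
          simp only [List.foldl_cons, pvAltSum, Bool.false_eq_true, if_false]
          rw [ih (acc - x) true]
          simp; ring

theorem pvMod2 (k : Nat) : PySem.Int.mod (k : Int) 2 = ((k % 2 : Nat) : Int) := by
  exact_mod_cast PySem.Int.mod_natCast k 2

-- summing the rows' values with signs +,-,+,- (offset o) is the alternating sum of the values
theorem pv_sum (m : List (List Int)) : ∀ (o : Nat),
    ((List.range m.length).map (fun i =>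
        if (o + i) % 2 = 0 then pvAltSum (m.getD i []) else -pvAltSum (m.getD i []))).sum
      = if o % 2 = 0 then pvAltSum (m.map pvAltSum) else -pvAltSum (m.map pvAltSum) := by
  induction m with
  | nil => intro o; simp [pvAltSum]
  | cons r t ih =>
      intro o
      rw [List.length_cons, List.range_succ_eq_map, List.map_cons, List.sum_cons,
          List.map_map]
      have h1 : ((List.range t.length).map
          ((fun i => if (o + i) % 2 = 0 then pvAltSum ((r :: t).getD i []) else
              -pvAltSum ((r :: t).getD i [])) ∘ Nat.succ)).sum
          = if (o + 1) % 2 = 0 then pvAltSum (t.map pvAltSum) else -pvAltSum (t.map pvAltSum) := by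
        rw [← ih (o + 1)]
        apply congrArg
        apply List.map_congr_left
        intro i _
        simp only [Function.comp, List.getD_cons_succ]
        have : o + Nat.succ i = o + 1 + i := by omega
        rw [this]
      rw [h1]
      simp only [List.map_cons, pvAltSum, List.getD_cons_zero, Nat.add_zero]
      rcases Nat.even_or_odd o with he | ho
      · have h2 : o % 2 = 0 := Nat.even_iff.mp he
        have h3 : (o + 1) % 2 ≠ 0 := by omega
        rw [if_pos h2, if_pos h2, if_neg h3]
        ring
      · have h2 : o % 2 ≠ 0 := by have := Nat.odd_iff.mp ho; omega
        have h3 : (o + 1) % 2 = 0 := by have := Nat.odd_iff.mp ho; omega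
        rw [if_neg h2, if_neg h2, if_pos h3]
        ring

-- ===== VERDICT (by name: the statement is the Claim_ definition above) =====
theorem score_matrix_spec : Claim_equal_score_matrix := by
  intro matrix _
  unfold Spec_score_matrix score_matrix score_matrix_alt
  dsimp only
  rw [PySem.List.foldl_append_singleton_eq_map, List.nil_append]
  have hmapB : matrix.map pvAlt = matrix.map pvAltSum :=
    List.map_congr_left (fun r _ => pvAlt_eq r)
  rw [hmapB, pvAlt_eq]
  simp only [PySem.List.len_eq]
  rw [PySem.List.pyRange_one, List.map_map]
  have hzero : ((matrix.length : Int) - 0).toNat = matrix.length := by omega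
  rw [hzero]
  have hcongr : ((List.range matrix.length).map
      ((fun i =>
        ((PySem.List.pyGetD matrix i []).foldl
          (fun (st : Int × Bool) num =>
            if st.2 then (st.1 + num, false) else (st.1 - num, true))
          (0, PySem.Int.mod i 2 == 0)).1) ∘ (fun k : Nat => (0 : Int) + k))).sum
      = ((List.range matrix.length).map (fun i =>
          if (0 + i) % 2 = 0 then pvAltSum (matrix.getD i []) else
            -pvAltSum (matrix.getD i []))).sum := by
    apply congrArg
    apply List.map_congr_left
    intro k _
    simp only [Function.comp, zero_add]
    rw [pv_row, pvMod2, PySem.List.pyGetD_natCast, zero_add]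
    rcases Nat.even_or_odd k with he | ho
    · have h2 : k % 2 = 0 := Nat.even_iff.mp he
      simp [h2]
    · have h2 : k % 2 = 1 := Nat.odd_iff.mp ho
      simp [h2]
  rw [hcongr, pv_sum matrix 0]
  simp
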